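-- pv_equiv track=rewrite | github.com/MilenMMinev/hackbulgaria-week0 | is_an_bn/solution.py | is_word_anbn
-- ===== SOURCE A (Python) =====
-- def is_word_anbn(string):
-- 	new = list(string)
-- 	if len(string) % 2 != 0 or len(string) < 2:
-- 		return False
-- 	half = len(new) // 2
-- 	first_half = new[half:]
-- 	second_half = new[:half]
-- 	for i in first_half:
-- 		if i != 'b':
-- 			return False
-- 	for j in second_half:
-- 		if j != 'a':
-- 			return False
-- 	return True
-- ===== SOURCE B (Python) =====
-- def is_word_anbn(string):
--     if len(string) % 2 != 0 or len(string) < 2: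
--         return False
--     half = len(string) // 2
--     return string == 'a' * half + 'b' * half
-- ===== Notes on version B (the rewrite author's own statement) =====
-- stated objective: simpler
-- what changed: Instead of scanning the two halves with separate loops, B builds the canonical a^n b^n string of the same length and returns a single equality comparison.
import Mathlib
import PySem

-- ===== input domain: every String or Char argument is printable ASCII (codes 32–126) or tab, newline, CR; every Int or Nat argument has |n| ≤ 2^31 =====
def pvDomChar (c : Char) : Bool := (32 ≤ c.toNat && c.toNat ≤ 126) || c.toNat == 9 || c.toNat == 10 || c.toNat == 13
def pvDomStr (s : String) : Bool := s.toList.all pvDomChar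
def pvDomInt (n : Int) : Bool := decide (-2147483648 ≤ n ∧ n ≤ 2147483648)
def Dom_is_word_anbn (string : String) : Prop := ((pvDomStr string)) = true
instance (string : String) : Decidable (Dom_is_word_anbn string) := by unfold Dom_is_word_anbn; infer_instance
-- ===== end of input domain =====

-- B replaces A's two half-scanning loops by building the canonical a^n b^n string and one equality (objective: simpler).


-- ===== PORT A =====
-- first loop: for i in first_half: if i != 'b': return False
def pvLoopB : List Char → Bool
  | [] => true
  | c :: rest => if c ≠ 'b' then false else pvLoopB rest

-- second loop: for j in second_half: if j != 'a': return False
def pvLoopA : List Char → Bool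
  | [] => true
  | c :: rest => if c ≠ 'a' then false else pvLoopA rest

def is_word_anbn (string : String) : Bool :=
  let new := string.toList
  if string.toList.length % 2 ≠ 0 ∨ string.toList.length < 2 then false
  else
    let half := new.length / 2
    let first_half := new.drop half   -- new[half:], nonneg in-range slice: exact
    let second_half := new.take half  -- new[:half], nonneg in-range slice: exact
    if pvLoopB first_half = false then false
    else if pvLoopA second_half = false then false
    else true

-- ===== PORT B =====
def is_word_anbn_alt (string : String) : Bool :=
  if string.toList.length % 2 ≠ 0 ∨ string.toList.length < 2 then false
  else
    let half := string.toList.length / 2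
    string.toList = List.replicate half 'a' ++ List.replicate half 'b'  -- string == 'a'*half + 'b'*half

-- ===== PRECONDITION & SPEC =====
def Spec_is_word_anbn (string : String) (out : Bool) : Prop := out = is_word_anbn_alt string
instance (string : String) (out : Bool) : Decidable (Spec_is_word_anbn string out) := by unfold Spec_is_word_anbn; infer_instance

-- ===== CLAIM (what is proved, stated in full; the proofs are below) =====
def Claim_equal_is_word_anbn : Prop := ∀ (string : String), Dom_is_word_anbn string → Spec_is_word_anbn string (is_word_anbn string)

-- ===== LEMMAS AND PROOFS =====
theorem pvLoopB_eq (l : List Char) : pvLoopB l = decide (l = List.replicate l.length 'b') := by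
  induction l with
  | nil => simp [pvLoopB]
  | cons c rest ih =>
    simp only [pvLoopB, List.length_cons, List.replicate_succ, ih]
    by_cases h : c = 'b' <;> simp [h]

theorem pvLoopA_eq (l : List Char) : pvLoopA l = decide (l = List.replicate l.length 'a') := by
  induction l with
  | nil => simp [pvLoopA]
  | cons c rest ih =>
    simp only [pvLoopA, List.length_cons, List.replicate_succ, ih]
    by_cases h : c = 'a' <;> simp [h]

theorem pvKey (l : List Char) (heven : l.length % 2 = 0) :
    (pvLoopB (l.drop (l.length / 2)) && pvLoopA (l.take (l.length / 2))) =
      decide (l = List.replicate (l.length / 2) 'a' ++ List.replicate (l.length / 2) 'b') := by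
  obtain ⟨k, hk⟩ : ∃ k, l.length = 2 * k := ⟨l.length / 2, by omega⟩
  have hk2 : l.length / 2 = k := by omega
  rw [hk2]
  have hdlen : (l.drop k).length = k := by simp [List.length_drop]; omega
  have htlen : (l.take k).length = k := by simp [List.length_take]; omega
  rw [pvLoopB_eq, pvLoopA_eq, hdlen, htlen, ← Bool.decide_and, decide_eq_decide]
  constructor
  · rintro ⟨hb, ha⟩
    conv_lhs => rw [← List.take_append_drop k l]
    rw [ha, hb]
  · intro h
    have hlen : (l.take k).length = (List.replicate k 'a').length := by
      simp [htlen]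
    have := List.append_inj ((List.take_append_drop k l).symm ▸ h) hlen
    exact ⟨this.2, this.1⟩

-- ===== VERDICT (by name: the statement is the Claim_ definition above) =====
theorem is_word_anbn_spec : Claim_equal_is_word_anbn := by
  intro s _
  unfold Spec_is_word_anbn is_word_anbn is_word_anbn_alt
  by_cases h : s.toList.length % 2 ≠ 0 ∨ s.toList.length < 2
  · rw [if_pos h, if_pos h]
  · rw [if_neg h, if_neg h]
    have heven : s.toList.length % 2 = 0 := by
      rcases not_or.mp h with ⟨h1, _⟩; omega
    have hkey := pvKey s.toList heven
    cases hB : pvLoopB (s.toList.drop (s.toList.length / 2)) <;>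
      cases hA : pvLoopA (s.toList.take (s.toList.length / 2)) <;>
      simp_all
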